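-- pv_equiv track=rewrite | github.com/dhruvbhargav08/DSA | Wifi_Range.py | wifiRange
-- ===== SOURCE A (Python) =====
-- def wifiRange(N, S, X):
--     #code here
--     temp=0
--     while temp<N and S[temp]!='1':
--         temp+=1
--     if temp==N or temp>X:
--         return False
--     flag=temp
--     for i in range (N):
--         if i-flag+1>2*(X+1):
--             return False
--         if S[i]=='1':
--             flag=i
--     if N-flag>X+1:
--         return False
--     return True
-- ===== SOURCE B (Python) =====
-- def wifiRange(N, S, X):
--     # Coverage check: house h is served iff some router ('1') sits within
--     # distance X of it.  Build a prefix count of routers over the first N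
--     # cells, then test each house's window [h-X, h+X] for emptiness with two
--     # prefix lookups.
--     prefix = [0]
--     for i in range(N):
--         prefix.append(prefix[i] + (1 if S[i] == '1' else 0))
--     for h in range(N):
--         lo = max(h - X, 0)
--         hi = min(h + X, N - 1)
--         if lo > hi or prefix[hi + 1] == prefix[lo]:
--             return False
--     return True
-- ===== Notes on version B (the rewrite author's own statement) =====
-- stated objective: alternative
-- what changed: Replaces A's scan that tracks the last seen router and checks first/gap/tail thresholds by a prefix count of routers plus a per-house window query (house h is served iff the prefix counts at the ends of [h-X, h+X] differ); Pre_ excludes N > len(S), where the house indices overrun the string and B's prefix pass raises IndexError (A raises too unless its first-router scan happens to return False early).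
-- intended difference: On a nonpositive house count with N = 0 or X < 0, A's fall-through returns False although no house is left uncovered, while B returns True (every house of the empty set is covered), the intended vacuous verdict. — e.g. on wifiRange(0, "", 0): A returns false, B returns true
-- outside the precondition, e.g. on wifiRange(5, '1', -1): A returns False, B raises IndexError; on wifiRange(3, '0', 1): A raises IndexError, B raises IndexError
import Mathlib
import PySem

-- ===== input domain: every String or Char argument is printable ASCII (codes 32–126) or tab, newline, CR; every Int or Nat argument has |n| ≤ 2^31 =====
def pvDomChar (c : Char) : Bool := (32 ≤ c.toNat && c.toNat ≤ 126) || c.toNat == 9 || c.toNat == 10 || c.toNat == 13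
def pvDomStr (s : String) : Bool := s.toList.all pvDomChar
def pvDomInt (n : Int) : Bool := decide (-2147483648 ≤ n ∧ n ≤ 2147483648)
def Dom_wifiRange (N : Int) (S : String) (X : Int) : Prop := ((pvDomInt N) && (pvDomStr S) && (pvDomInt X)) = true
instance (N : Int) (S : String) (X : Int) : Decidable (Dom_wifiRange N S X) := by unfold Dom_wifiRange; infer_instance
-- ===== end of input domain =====

-- B (objective: alternative): instead of A's scan that tracks the last router and checks
-- first/gap/tail thresholds, B builds a prefix count of routers and checks, for every house,
-- that its window [h-X, h+X] contains a router (two prefix lookups per house).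

-- ===== PORT A =====
-- 'temp=0; while temp<N and S[temp]!='1': temp+=1'
def wifiWhile (cs : List Char) (N temp : Int) : Int :=
  if h : temp < N ∧ PySem.List.pyGet? cs temp ≠ some '1' then
    wifiWhile cs N (temp + 1)
  else temp
termination_by (N - temp).toNat
decreasing_by have := h.1; omega

-- body of A's 'for i in range(N)' loop; Sum.inl b = 'already returned b', Sum.inr flag = running state
def wifiStep (cs : List Char) (X : Int) (st : Sum Bool Int) (i : Int) : Sum Bool Int :=
  match st with
  | Sum.inl b => Sum.inl b
  | Sum.inr flag =>
    if i - flag + 1 > 2 * (X + 1) then Sum.inl false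
    else if PySem.List.pyGet? cs i == some '1' then Sum.inr i else Sum.inr flag

def wifiRange (N : Int) (S : String) (X : Int) : Bool :=
  let cs := S.toList
  let temp := wifiWhile cs N 0
  if temp = N ∨ temp > X then false
  else
    match (PySem.List.pyRange 0 N 1).foldl (wifiStep cs X) (Sum.inr temp) with
    | Sum.inl b => b
    | Sum.inr flag => if N - flag > X + 1 then false else true

-- ===== PORT B =====
-- 'prefix = [0]; for i in range(N): prefix.append(prefix[i] + (1 if S[i]=='1' else 0))'
-- (prefix[i] is always in range while the list is built, so pyGetD's default is never used)
def buildPrefix (cs : List Char) (N : Int) : List Int :=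
  (PySem.List.pyRange 0 N 1).foldl
    (fun p i => p ++ [PySem.List.pyGetD p i 0 + (if PySem.List.pyGet? cs i = some '1' then 1 else 0)])
    [0]

-- 'for h in range(N): lo = max(h-X,0); hi = min(h+X,N-1); if lo > hi or prefix[hi+1]==prefix[lo]: return False'
-- (the lookups happen only when lo ≤ hi, hence at indices 0 ≤ lo ≤ hi+1 ≤ N, in range)
def houseLoop (pre : List Int) (N X h : Int) : Bool :=
  if hlt : h < N then
    let lo := max (h - X) 0
    let hi := min (h + X) (N - 1)
    if lo > hi ∨ PySem.List.pyGetD pre (hi + 1) 0 = PySem.List.pyGetD pre lo 0 then false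
    else houseLoop pre N X (h + 1)
  else true
termination_by (N - h).toNat
decreasing_by omega

def wifiRange_alt (N : Int) (S : String) (X : Int) : Bool :=
  houseLoop (buildPrefix S.toList N) N X 0

-- ===== PRECONDITION & SPEC =====
-- Pre_ excludes N > len(S): there the house indices overrun the string, B's prefix pass raises
-- IndexError, and A raises too unless its first-router scan happens to return False early (see cites).
def Pre_wifiRange (N : Int) (S : String) (X : Int) : Prop := N ≤ (S.toList.length : Int)
instance (N : Int) (S : String) (X : Int) : Decidable (Pre_wifiRange N S X) := by unfold Pre_wifiRange; infer_instance
def pvWitness_wifiRange : Int × String × Int := (2, "11", 0)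

-- On a nonpositive house count with N = 0 or X < 0, A's fall-through returns False although there
-- is no house left uncovered, while B returns True (every house of the empty set is covered),
-- the intended vacuous verdict.
def D_wifiRange (N : Int) (S : String) (X : Int) : Prop := N ≤ 0 ∧ (N = 0 ∨ X < 0)
instance (N : Int) (S : String) (X : Int) : Decidable (D_wifiRange N S X) := by unfold D_wifiRange; infer_instance

def Spec_wifiRange (N : Int) (S : String) (X : Int) (out : Bool) : Prop := ¬ D_wifiRange N S X → out = wifiRange_alt N S X
instance (N : Int) (S : String) (X : Int) (out : Bool) : Decidable (Spec_wifiRange N S X out) := by unfold Spec_wifiRange; infer_instance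

def pvDiffWitness_wifiRange : Int × String × Int := (0, "", 0)
def pvDiffWitnessOut_wifiRange : Bool × Bool := (false, true)

-- ===== CLAIM (what is proved, stated in full; the proofs are below) =====
def Claim_unchanged_wifiRange : Prop := ∀ (N : Int) (S : String) (X : Int), Dom_wifiRange N S X → Pre_wifiRange N S X → Spec_wifiRange N S X (wifiRange N S X)
def Claim_changed_wifiRange : Prop := Dom_wifiRange (pvDiffWitness_wifiRange.1) (pvDiffWitness_wifiRange.2.1) (pvDiffWitness_wifiRange.2.2) ∧ Pre_wifiRange (pvDiffWitness_wifiRange.1) (pvDiffWitness_wifiRange.2.1) (pvDiffWitness_wifiRange.2.2) ∧ D_wifiRange (pvDiffWitness_wifiRange.1) (pvDiffWitness_wifiRange.2.1) (pvDiffWitness_wifiRange.2.2) ∧ wifiRange (pvDiffWitness_wifiRange.1) (pvDiffWitness_wifiRange.2.1) (pvDiffWitness_wifiRange.2.2) = pvDiffWitnessOut_wifiRange.1 ∧ wifiRange_alt (pvDiffWitness_wifiRange.1) (pvDiffWitness_wifiRange.2.1) (pvDiffWitness_wifiRange.2.2) = pvDiffWitnessOut_wifiRange.2 ∧ pvDiffWitnessOut_wifiRange.1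 ≠ pvDiffWitnessOut_wifiRange.2
def Claim_exact_wifiRange : Prop := ∀ (N : Int) (S : String) (X : Int), Dom_wifiRange N S X → Pre_wifiRange N S X → D_wifiRange N S X → wifiRange N S X ≠ wifiRange_alt N S X

-- ===== LEMMAS AND PROOFS =====

-- the (sorted) list of router positions among houses 0..N-1, from index t on
def routers (cs : List Char) (N t : Int) : List Int :=
  (PySem.List.pyRange t N 1).filter (fun i => PySem.List.pyGet? cs i == some '1')

-- value of A's for-loop-plus-tail-check starting at index t with last router 'flag'
def Aout (cs : List Char) (N X t flag : Int) : Bool :=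
  match (PySem.List.pyRange t N 1).foldl (wifiStep cs X) (Sum.inr flag) with
  | Sum.inl b => b
  | Sum.inr f => if N - f > X + 1 then false else true

-- A's gap condition over consecutive router pairs, as B-shaped data for the proofs
def gapsOk (X : Int) : List (Int × Int) → Bool
  | [] => true
  | (a, b) :: rest => if b - a > 2 * X + 1 then false else gapsOk X rest

-- number of routers among houses 0..k-1
def cntR (cs : List Char) (k : Int) : Int :=
  ((PySem.List.pyRange 0 k 1).countP (fun i => PySem.List.pyGet? cs i == some '1') : Int)

-- every house from h0 on is within X of a router
def Cov (cs : List Char) (N X h0 : Int) : Prop :=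
  ∀ h, h0 ≤ h → h < N → ∃ r ∈ routers cs N 0, h - X ≤ r ∧ r ≤ h + X

lemma foldl_wifiStep_inl (cs : List Char) (X : Int) (l : List Int) (b : Bool) :
    l.foldl (wifiStep cs X) (Sum.inl b) = Sum.inl b := by
  induction l with
  | nil => rfl
  | cons a l ih => simpa [wifiStep] using ih

lemma wifiWhile_eq (cs : List Char) (N t : Int) (ht : t ≤ N) :
    wifiWhile cs N t = (routers cs N t).headD N := by
  rw [wifiWhile]
  by_cases h : t < N ∧ PySem.List.pyGet? cs t ≠ some '1'
  · rw [dif_pos h]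
    have hp : (PySem.List.pyGet? cs t == some '1') = false := by simpa using h.2
    rw [routers, PySem.List.pyRange_one_cons h.1, List.filter_cons_of_neg (by simp [hp])]
    exact wifiWhile_eq cs N (t + 1) (by omega)
  · rw [dif_neg h]
    by_cases h2 : t < N
    · have hp : PySem.List.pyGet? cs t = some '1' := by tauto
      rw [routers, PySem.List.pyRange_one_cons h2, List.filter_cons_of_pos (by simp [hp])]
      rfl
    · have : t = N := by omega
      subst this
      rw [routers, PySem.List.pyRange_one_eq_nil le_rfl]
      rfl
termination_by (N - t).toNat
decreasing_by have := h.1; omega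

lemma Aout_eq (cs : List Char) (N X t flag : Int) (hX : 0 ≤ X) (ht : t ≤ N) :
    Aout cs N X t flag
      = (gapsOk X ((flag :: routers cs N t).zip (routers cs N t))
          && decide (N - (flag :: routers cs N t).getLastD 0 ≤ X + 1)) := by
  by_cases hlt : t < N
  · have hrange : PySem.List.pyRange t N 1 = t :: PySem.List.pyRange (t + 1) N 1 :=
      PySem.List.pyRange_one_cons hlt
    by_cases hp : (PySem.List.pyGet? cs t == some '1') = true
    · have hr : routers cs N t = t :: routers cs N (t + 1) := by
        rw [routers, routers, hrange]; simp [hp]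
      by_cases hth : t - flag + 1 > 2 * (X + 1)
      · have hstep : wifiStep cs X (Sum.inr flag) t = Sum.inl false := by
          simp only [wifiStep]; rw [if_pos hth]
        rw [Aout, hrange, List.foldl_cons, hstep, foldl_wifiStep_inl, hr]
        simp only [List.zip_cons_cons, gapsOk]
        rw [if_pos (show t - flag > 2 * X + 1 by omega)]
        simp
      · have hstep : wifiStep cs X (Sum.inr flag) t = Sum.inr t := by
          simp only [wifiStep]; rw [if_neg hth]; simp [hp]
        have ih := Aout_eq cs N X (t + 1) t hX (by omega)
        rw [Aout] at ih
        rw [Aout, hrange, List.foldl_cons, hstep, ih, hr]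
        simp only [List.zip_cons_cons, gapsOk]
        rw [if_neg (show ¬ t - flag > 2 * X + 1 by omega)]
        simp
    · have hr : routers cs N t = routers cs N (t + 1) := by
        rw [routers, routers, hrange]; simp [hp]
      by_cases hth : t - flag + 1 > 2 * (X + 1)
      · have hstep : wifiStep cs X (Sum.inr flag) t = Sum.inl false := by
          simp only [wifiStep]; rw [if_pos hth]
        rw [Aout, hrange, List.foldl_cons, hstep, foldl_wifiStep_inl, hr]
        rcases hq : routers cs N (t + 1) with _ | ⟨q, l⟩
        · simp only [List.zip_nil_right, gapsOk, Bool.true_and, List.getLastD_cons]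
          have : ¬ (N - flag ≤ X + 1) := by omega
          simp [this]
        · have hqm : q ∈ PySem.List.pyRange (t + 1) N 1 := by
            have hmem : q ∈ routers cs N (t + 1) := by rw [hq]; exact List.mem_cons_self
            rw [routers] at hmem
            exact (List.mem_filter.mp hmem).1
          have hq1 : t + 1 ≤ q := (PySem.List.mem_pyRange_one.mp hqm).1
          simp only [List.zip_cons_cons, gapsOk]
          rw [if_pos (show q - flag > 2 * X + 1 by omega)]
          simp
      · have hstep : wifiStep cs X (Sum.inr flag) t = Sum.inr flag := by
          simp only [wifiStep]; rw [if_neg hth]; simp [hp]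
        have ih := Aout_eq cs N X (t + 1) flag hX (by omega)
        rw [Aout] at ih
        rw [Aout, hrange, List.foldl_cons, hstep, ih, hr]
  · have hr : routers cs N t = [] := by
      rw [routers, PySem.List.pyRange_one_eq_nil (by omega)]; rfl
    rw [Aout, PySem.List.pyRange_one_eq_nil (by omega : N ≤ t), hr]
    simp only [List.foldl_nil, List.zip_nil_right, gapsOk, Bool.true_and, List.getLastD_cons]
    split_ifs with h <;> simp <;> omega
termination_by (N - t).toNat

-- membership in the router list, spelled out
lemma mem_routers (cs : List Char) (N r : Int) :
    r ∈ routers cs N 0 ↔ (0 ≤ r ∧ r < N ∧ PySem.List.pyGet? cs r = some '1') := by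
  rw [routers, List.mem_filter, PySem.List.mem_pyRange_one]
  simp; tauto

lemma routers_pairwise (cs : List Char) (N : Int) :
    (routers cs N 0).Pairwise (· < ·) :=
  (PySem.List.pairwise_lt_pyRange_one 0 N).filter _

lemma cntR_succ (cs : List Char) (k : Int) (hk : 0 ≤ k) :
    cntR cs (k + 1) = cntR cs k + (if PySem.List.pyGet? cs k = some '1' then 1 else 0) := by
  rw [cntR, cntR, PySem.List.pyRange_one_succ_right hk, List.countP_append]
  by_cases h : PySem.List.pyGet? cs k = some '1' <;>
    simp [List.countP_cons, h]

lemma buildPrefix_eq (cs : List Char) (n : Nat) :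
    buildPrefix cs (n : Int) = (PySem.List.pyRange 0 ((n : Int) + 1) 1).map (cntR cs) := by
  induction n with
  | zero =>
    simp only [Nat.cast_zero, buildPrefix]
    rw [PySem.List.pyRange_one_eq_nil le_rfl,
        show (0 : Int) + 1 = 0 + 1 by norm_num, PySem.List.pyRange_one_singleton]
    simp [cntR, PySem.List.pyRange_one_eq_nil le_rfl]
  | succ n ih =>
    rw [buildPrefix] at ih ⊢
    rw [show ((n + 1 : Nat) : Int) = (n : Int) + 1 by push_cast; ring,
        PySem.List.pyRange_one_succ_right (by positivity), List.foldl_append, ih]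
    simp only [List.foldl_cons, List.foldl_nil]
    have hget : PySem.List.pyGetD ((PySem.List.pyRange 0 ((n : Int) + 1) 1).map (cntR cs)) (n : Int) 0
        = cntR cs (n : Int) :=
      PySem.List.pyGetD_map_pyRange_of_nonneg _ _ _ _ (by positivity) (by omega)
    rw [hget, PySem.List.pyRange_one_succ_right (by positivity : (0:Int) ≤ (n : Int) + 1),
        List.map_append]
    simp [cntR_succ cs (n : Int) (by positivity)]

lemma buildPrefix_get (cs : List Char) (N k : Int) (hN : 0 ≤ N) (h0 : 0 ≤ k) (hk : k ≤ N) :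
    PySem.List.pyGetD (buildPrefix cs N) k 0 = cntR cs k := by
  have hNn : N = ((N.toNat : Nat) : Int) := by omega
  rw [hNn, buildPrefix_eq]
  exact PySem.List.pyGetD_map_pyRange_of_nonneg _ _ _ _ h0 (by omega)

-- the prefix counts differ over a window iff the window holds a router
lemma window_iff (cs : List Char) (N X h : Int) (hh : 0 ≤ h) (hhN : h < N) :
    (max (h - X) 0 ≤ min (h + X) (N - 1) ∧
      cntR cs (min (h + X) (N - 1) + 1) ≠ cntR cs (max (h - X) 0))
    ↔ ∃ r ∈ routers cs N 0, h - X ≤ r ∧ r ≤ h + X := by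
  set lo := max (h - X) 0 with hlo
  set hi := min (h + X) (N - 1) with hhi
  constructor
  · rintro ⟨hle, hne⟩
    have hsplit : PySem.List.pyRange 0 (hi + 1) 1
        = PySem.List.pyRange 0 lo 1 ++ PySem.List.pyRange lo (hi + 1) 1 :=
      PySem.List.pyRange_one_append 0 lo (hi + 1) (by omega) (by omega)
    rw [cntR, cntR, hsplit, List.countP_append] at hne
    have hpos : 0 < (PySem.List.pyRange lo (hi + 1) 1).countP
        (fun i => PySem.List.pyGet? cs i == some '1') := by omega
    obtain ⟨r, hrmem, hrp⟩ := List.countP_pos_iff.mp hpos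
    have hrb := PySem.List.mem_pyRange_one.mp hrmem
    refine ⟨r, (mem_routers cs N r).mpr ⟨by omega, by omega, by simpa using hrp⟩, by omega, by omega⟩
  · rintro ⟨r, hr, hr1, hr2⟩
    obtain ⟨hr0, hrN, hr1'⟩ := (mem_routers cs N r).mp hr
    have hle : lo ≤ hi := by omega
    refine ⟨hle, ?_⟩
    have hsplit : PySem.List.pyRange 0 (hi + 1) 1
        = PySem.List.pyRange 0 lo 1 ++ PySem.List.pyRange lo (hi + 1) 1 :=
      PySem.List.pyRange_one_append 0 lo (hi + 1) (by omega) (by omega)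
    rw [cntR, cntR, hsplit, List.countP_append]
    have hpos : 0 < (PySem.List.pyRange lo (hi + 1) 1).countP
        (fun i => PySem.List.pyGet? cs i == some '1') :=
      List.countP_pos_iff.mpr ⟨r, PySem.List.mem_pyRange_one.mpr ⟨by omega, by omega⟩, by simp [hr1']⟩
    omega

lemma houseLoop_iff (cs : List Char) (N X h0 : Int) (hN : 0 ≤ N) (hh0 : 0 ≤ h0) :
    houseLoop (buildPrefix cs N) N X h0 = true ↔ Cov cs N X h0 := by
  rw [houseLoop]
  by_cases hlt : h0 < N
  · rw [dif_pos hlt]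
    set lo := max (h0 - X) 0 with hlo
    set hi := min (h0 + X) (N - 1) with hhi
    by_cases hc : lo > hi ∨ PySem.List.pyGetD (buildPrefix cs N) (hi + 1) 0
        = PySem.List.pyGetD (buildPrefix cs N) lo 0
    · rw [if_pos hc]
      simp only [Bool.false_eq_true, false_iff]
      intro hcov
      obtain ⟨r, hr, hr1, hr2⟩ := hcov h0 le_rfl hlt
      have hw := (window_iff cs N X h0 hh0 hlt).mpr ⟨r, hr, hr1, hr2⟩
      rcases hc with hc | hc
      · omega
      · have hle : lo ≤ hi := hw.1
        rw [buildPrefix_get cs N (hi + 1) hN (by omega) (by omega),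
            buildPrefix_get cs N lo hN (by omega) (by omega)] at hc
        exact hw.2 hc
    · rw [if_neg hc]
      push_neg at hc
      obtain ⟨hle, hne⟩ := hc
      rw [buildPrefix_get cs N (hi + 1) hN (by omega) (by omega),
          buildPrefix_get cs N lo hN (by omega) (by omega)] at hne
      have hw := (window_iff cs N X h0 hh0 hlt).mp ⟨hle, hne⟩
      rw [houseLoop_iff cs N X (h0 + 1) hN (by omega)]
      constructor
      · intro hcov h hh hhN2
        rcases eq_or_lt_of_le hh with rfl | hlt2
        · exact hw
        · exact hcov h (by omega) hhN2
      · intro hcov h hh hhN2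
        exact hcov h (by omega) hhN2
  · rw [dif_neg hlt]
    simp only [true_iff]
    intro h hh hhN2
    omega
termination_by (N - h0).toNat
decreasing_by omega

-- coverage of all houses from p0 - X on ↔ A's gap and tail conditions, for a sorted router list
lemma covChar (cs : List Char) (N X : Int) (hX : 0 ≤ X) :
    ∀ (rest : List Int) (p0 : Int),
    (p0 :: rest).Pairwise (· < ·) →
    (∀ r ∈ p0 :: rest, r ∈ routers cs N 0) →
    p0 < N →
    ((∀ h, p0 - X ≤ h → h < N → ∃ r ∈ (p0 :: rest), h - X ≤ r ∧ r ≤ h + X)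
      ↔ (gapsOk X ((p0 :: rest).zip rest) = true ∧ N - (p0 :: rest).getLastD 0 ≤ X + 1)) := by
  intro rest
  induction rest with
  | nil =>
    intro p0 _ _ hp0N
    simp only [List.zip_nil_right, gapsOk, List.getLastD_cons, List.getLastD_nil, true_and]
    constructor
    · intro hcov
      obtain ⟨r, hr, hr1, hr2⟩ := hcov (N - 1) (by omega) (by omega)
      simp only [List.mem_singleton] at hr
      omega
    · intro htail h hh1 hh2
      exact ⟨p0, List.mem_singleton_self p0, by omega, by omega⟩
  | cons p1 rest' ih =>
    intro p0 hpw hmem hp0N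
    have hp01 : p0 < p1 := (List.pairwise_cons.mp hpw).1 p1 List.mem_cons_self
    have hpw' : (p1 :: rest').Pairwise (· < ·) := (List.pairwise_cons.mp hpw).2
    have hmem' : ∀ r ∈ p1 :: rest', r ∈ routers cs N 0 := fun r hr =>
      hmem r (List.mem_cons_of_mem p0 hr)
    have hp1N : p1 < N := by
      have := (mem_routers cs N p1).mp (hmem' p1 List.mem_cons_self)
      omega
    have htail_ge : ∀ r ∈ p1 :: rest', p1 ≤ r := by
      intro r hr
      rcases List.mem_cons.mp hr with rfl | hr'
      · exact le_rfl
      · exact le_of_lt ((List.pairwise_cons.mp hpw').1 r hr')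
    have ihspec := ih p1 hpw' hmem' hp1N
    simp only [List.getLastD_cons] at ihspec
    simp only [List.zip_cons_cons, gapsOk, List.getLastD_cons]
    constructor
    · intro hcov
      have hgap : ¬ (p1 - p0 > 2 * X + 1) := by
        intro hg
        obtain ⟨r, hr, hr1, hr2⟩ := hcov (p0 + X + 1) (by omega) (by omega)
        rcases List.mem_cons.mp hr with rfl | hr'
        · omega
        · have := htail_ge r hr'; omega
      have hcov' : ∀ h, p1 - X ≤ h → h < N → ∃ r ∈ (p1 :: rest'), h - X ≤ r ∧ r ≤ h + X := by
        intro h hh1 hh2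
        obtain ⟨r, hr, hr1, hr2⟩ := hcov h (by omega) hh2
        rcases List.mem_cons.mp hr with rfl | hr'
        · exact ⟨p1, List.mem_cons_self, by omega, by omega⟩
        · exact ⟨r, hr', hr1, hr2⟩
      have := ihspec.mp hcov'
      rw [if_neg hgap]
      exact ⟨this.1, this.2⟩
    · rintro ⟨hgaps, htail⟩
      by_cases hg : p1 - p0 > 2 * X + 1
      · rw [if_pos hg] at hgaps; exact absurd hgaps (by simp)
      · rw [if_neg hg] at hgaps
        have hcov' := ihspec.mpr ⟨hgaps, htail⟩
        intro h hh1 hh2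
        by_cases hcase : p1 - X ≤ h
        · obtain ⟨r, hr, hr1, hr2⟩ := hcov' h hcase hh2
          exact ⟨r, List.mem_cons_of_mem p0 hr, hr1, hr2⟩
        · exact ⟨p0, List.mem_cons_self, by omega, by omega⟩

theorem wifiRange_eq_alt (N : Int) (S : String) (X : Int)
    (hpre : 1 ≤ N) : wifiRange N S X = wifiRange_alt N S X := by
  have hN1 := hpre
  have hN : 0 ≤ N := by omega
  set cs := S.toList with hcs
  have hB := houseLoop_iff cs N X 0 hN le_rfl
  rw [wifiRange_alt, ← hcs]
  simp only [wifiRange, ← hcs]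
  have htemp : wifiWhile cs N 0 = (routers cs N 0).headD N := wifiWhile_eq cs N 0 hN
  rcases hpos : routers cs N 0 with _ | ⟨p0, rest⟩
  · -- no routers: A returns False; B's first house finds no router
    rw [htemp, hpos]
    simp only [List.headD_nil]
    simp only [true_or, if_true]
    have : ¬ Cov cs N X 0 := by
      intro hcov
      obtain ⟨r, hr, _, _⟩ := hcov 0 le_rfl (by omega)
      rw [hpos] at hr
      exact absurd hr (List.not_mem_nil)
    rcases hb : houseLoop (buildPrefix cs N) N X 0 with _ | _
    · rfl
    · exact absurd (hB.mp hb) this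
  · have hmemall : ∀ r ∈ p0 :: rest, r ∈ routers cs N 0 := by
      intro r hr; rw [hpos]; exact hr
    have hp0r := (mem_routers cs N p0).mp (hmemall p0 List.mem_cons_self)
    have hpw : (p0 :: rest).Pairwise (· < ·) := hpos ▸ routers_pairwise cs N
    have htail_ge : ∀ r ∈ p0 :: rest, p0 ≤ r := by
      intro r hr
      rcases List.mem_cons.mp hr with rfl | hr'
      · exact le_rfl
      · exact le_of_lt ((List.pairwise_cons.mp hpw).1 r hr')
    rw [htemp, hpos]
    simp only [List.headD_cons]
    by_cases hx : p0 > X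
    · -- first router out of range: A returns False; B's house 0 (X ≥ 0) or house p0 (X < 0) is uncovered
      rw [if_pos (Or.inr hx)]
      have : ¬ Cov cs N X 0 := by
        intro hcov
        by_cases hXn : 0 ≤ X
        · obtain ⟨r, hr, hr1, hr2⟩ := hcov 0 le_rfl (by omega)
          rw [hpos] at hr
          have := htail_ge r hr; omega
        · obtain ⟨r, hr, hr1, hr2⟩ := hcov p0 (by omega) (by omega)
          rw [hpos] at hr
          have := htail_ge r hr; omega
      rcases hb : houseLoop (buildPrefix cs N) N X 0 with _ | _
      · rfl
      · exact absurd (hB.mp hb) this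
    · have hXpos : 0 ≤ X := by omega
      rw [if_neg (by omega : ¬ (p0 = N ∨ p0 > X))]
      have hA := Aout_eq cs N X 0 p0 hXpos hN
      rw [Aout, hpos] at hA
      rw [hA]
      simp only [List.zip_cons_cons, gapsOk]
      rw [if_neg (show ¬ p0 - p0 > 2 * X + 1 by omega)]
      have hl : (p0 :: p0 :: rest).getLastD 0 = (p0 :: rest).getLastD 0 := by simp
      rw [hl]
      have hchar := covChar cs N X hXpos rest p0 hpw hmemall (by omega)
      -- Cov 0 ↔ the h ≥ p0 - X coverage statement (p0 ≤ X, so p0 - X ≤ 0; below 0, p0 covers)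
      have hcov_iff : Cov cs N X 0 ↔
          (∀ h, p0 - X ≤ h → h < N → ∃ r ∈ (p0 :: rest), h - X ≤ r ∧ r ≤ h + X) := by
        constructor
        · intro hcov h hh1 hh2
          by_cases hh0 : 0 ≤ h
          · obtain ⟨r, hr, hr1, hr2⟩ := hcov h hh0 hh2
            rw [hpos] at hr
            exact ⟨r, hr, hr1, hr2⟩
          · exact ⟨p0, List.mem_cons_self, by omega, by omega⟩
        · intro hcov h hh1 hh2
          obtain ⟨r, hr, hr1, hr2⟩ := hcov h (by omega) hh2
          exact ⟨r, hpos ▸ hr, hr1, hr2⟩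
      rcases hb : houseLoop (buildPrefix cs N) N X 0 with _ | _
      · -- B false: coverage fails, so gaps ∧ tail fails
        have : ¬ (gapsOk X ((p0 :: rest).zip rest) = true ∧ N - (p0 :: rest).getLastD 0 ≤ X + 1) := by
          intro hc
          have := hcov_iff.mpr (hchar.mpr hc)
          have hb' : houseLoop (buildPrefix cs N) N X 0 = true := hB.mpr this
          rw [hb] at hb'; exact absurd hb' (by simp)
        rcases hg : gapsOk X ((p0 :: rest).zip rest) with _ | _
        · simp
        · simp only [hg, Bool.true_and, true_and] at this ⊢
          simpa using this
      · -- B true: coverage holds, so gaps ∧ tail holds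
        have hc := hchar.mp (hcov_iff.mp (hB.mp hb))
        rw [hc.1]
        simpa using hc.2

-- both programs on a degenerate (nonpositive) house count: none of the loops run
lemma wifiRange_nonpos (N : Int) (S : String) (X : Int) (hN : N ≤ 0) :
    wifiRange N S X = (decide (N ≠ 0) && decide (0 ≤ X)) ∧ wifiRange_alt N S X = true := by
  constructor
  · have hw : wifiWhile S.toList N 0 = 0 := by
      rw [wifiWhile, dif_neg (by omega : ¬ (0 < N ∧ PySem.List.pyGet? S.toList 0 ≠ some '1'))]
    simp only [wifiRange, hw]
    by_cases h0 : N = 0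
    · rw [if_pos (Or.inl h0.symm)]; simp [h0]
    · by_cases hX : 0 ≤ X
      · rw [if_neg (by omega : ¬ ((0:Int) = N ∨ 0 > X)),
            PySem.List.pyRange_one_eq_nil (by omega : N ≤ 0)]
        simp only [List.foldl_nil]
        rw [if_neg (by omega : ¬ N - 0 > X + 1)]
        simp [h0, hX]
      · rw [if_pos (Or.inr (by omega : (0:Int) > X))]
        simp [hX]
  · rw [wifiRange_alt, houseLoop, dif_neg (by omega : ¬ (0 < N))]

-- ===== VERDICT (by name: the statement is the Claim_ definition above) =====
theorem wifiRange_spec : Claim_unchanged_wifiRange := by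
  intro N S X _ _ hnd
  by_cases h1 : 1 ≤ N
  · exact wifiRange_eq_alt N S X h1
  · have hd : ¬ (N = 0 ∨ X < 0) := fun h => hnd ⟨by omega, h⟩
    obtain ⟨hA, hB⟩ := wifiRange_nonpos N S X (by omega)
    rw [hA, hB]
    simp only [Bool.and_eq_true, decide_eq_true_eq]
    constructor <;> [skip; skip] <;> first | (apply decide_eq_true; omega) | omega

theorem wifiRange_changed : Claim_changed_wifiRange := by
  unfold Claim_changed_wifiRange
  obtain ⟨hA, hB⟩ := wifiRange_nonpos 0 "" 0 (by omega)
  refine ⟨by decide, by decide, by decide, ?_, ?_, by decide⟩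
  · show wifiRange 0 "" 0 = false
    simpa using hA
  · show wifiRange_alt 0 "" 0 = true
    exact hB

theorem wifiRange_tight : Claim_exact_wifiRange := by
  intro N S X _ _ hd
  obtain ⟨hA, hB⟩ := wifiRange_nonpos N S X hd.1
  rw [hA, hB]
  rcases hd.2 with h | h <;> simp [h] <;> omega
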